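-- pv_equiv track=rewrite | github.com/ankur060592/Fashion_Recom | run_script/yolo_inference.py | map_to_correct_label
-- ===== SOURCE A (Python) =====
-- def map_to_correct_label(labels):
--     """Map similar labels to the most correct one."""
--     label_priority = {
--         "top": ["t-shirt", "sweatshirt", "shirt"],
--         "jacket": ["coat"],
--         "sleeve": ["sleeve"],
--     }
--
--     final_labels = set()
--     for label in labels:
--         found = False
--         for correct_label, similar_labels in label_priority.items():
--             if label in similar_labels:
--                 final_labels.add(correct_label)
--                 found = True
--                 break
--         if not found:
--             final_labels.add(label)
--
--     return list(final_labels)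
-- ===== SOURCE B (Python) =====
-- def map_to_correct_label(labels):
--     """Map similar labels to the most correct one.
--
--     Staged pipeline: map every label through a flat reverse-lookup table in one
--     comprehension, then deduplicate once with dict.fromkeys (first occurrences,
--     in order).  A's outer loop, inner scan, found flag, break and incremental
--     set disappear.  Note: A returns list(set(...)), whose order is CPython's
--     unspecified hash order; B returns the same labels in first-occurrence order.
--     """
--     canonical = {
--         "t-shirt": "top",
--         "sweatshirt": "top",
--         "shirt": "top",
--         "coat": "jacket",
--         "sleeve": "sleeve",
--     }
--     return list(dict.fromkeys(canonical.get(label, label) for label in labels))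
-- ===== Notes on version B (the rewrite author's own statement) =====
-- stated objective: idiomatic
-- what changed: A's per-label loop with a nested scan over the priority table (found flag, break) and an incrementally grown set is replaced by a two-stage pipeline: one map through a flat reverse-lookup table, then one dict.fromkeys deduplication pass; no explicit loop, flag, break or set remains, and the returned labels are in first-occurrence order (A's list(set(...)) order is unspecified hash order).
import Mathlib
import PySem

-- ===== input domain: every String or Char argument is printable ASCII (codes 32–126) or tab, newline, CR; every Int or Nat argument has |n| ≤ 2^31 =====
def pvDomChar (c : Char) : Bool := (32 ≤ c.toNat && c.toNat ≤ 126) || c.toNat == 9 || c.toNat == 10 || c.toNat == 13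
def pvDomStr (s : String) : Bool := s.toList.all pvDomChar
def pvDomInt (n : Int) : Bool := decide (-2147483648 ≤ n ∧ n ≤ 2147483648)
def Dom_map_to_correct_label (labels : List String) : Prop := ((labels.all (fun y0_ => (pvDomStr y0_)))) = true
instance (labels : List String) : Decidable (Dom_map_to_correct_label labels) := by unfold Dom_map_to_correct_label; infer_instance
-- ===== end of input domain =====

-- B replaces A's per-label loop (nested scan over the priority table, found flag,
-- break, incrementally grown set) by a two-stage pipeline: a map through a flat
-- reverse-lookup table, then one dict.fromkeys deduplication pass; the same
-- deduplicated labels are returned (A's list(set(...)) order is CPython's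
-- unspecified hash order; both ports model the collection in first-occurrence order).

-- ===== PORT A =====
-- the literal label_priority dict, in insertion order
def pvPriority : List (String × List String) :=
  [("top", ["t-shirt", "sweatshirt", "shirt"]),
   ("jacket", ["coat"]),
   ("sleeve", ["sleeve"])]

-- inner 'for correct_label, similar_labels in ...: if label in similar_labels: add; found=True; break'
-- returns the first matching canonical label (the break), none = found stays False
def pvScan (label : String) : List (String × List String) → Option String
  | [] => none
  | (c, sims) :: rest => if label ∈ sims then some c else pvScan label rest

def map_to_correct_label (labels : List String) : List String :=
  labels.foldl (fun final_labels label =>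
    match pvScan label pvPriority with
    | some c => PySem.Set.add final_labels c
    | none => PySem.Set.add final_labels label) PySem.Set.empty

-- ===== PORT B =====
def pvCanonical : PySem.Dict String String :=
  PySem.Dict.ofList
    [("t-shirt", "top"), ("sweatshirt", "top"), ("shirt", "top"),
     ("coat", "jacket"), ("sleeve", "sleeve")]

-- list(dict.fromkeys(canonical.get(label, label) for label in labels))
def map_to_correct_label_alt (labels : List String) : List String :=
  PySem.List.dedup (labels.map (fun label => PySem.Dict.getD pvCanonical label label))

-- ===== PRECONDITION & SPEC =====
def Spec_map_to_correct_label (labels : List String) (out : List String) : Prop := out = map_to_correct_label_alt labels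
instance (labels : List String) (out : List String) : Decidable (Spec_map_to_correct_label labels out) := by unfold Spec_map_to_correct_label; infer_instance

-- ===== CLAIM =====
def Claim_equal_map_to_correct_label : Prop := ∀ (labels : List String), Dom_map_to_correct_label labels → Spec_map_to_correct_label labels (map_to_correct_label labels)

-- ===== LEMMAS AND PROOFS =====

-- per-label agreement: A's first-match scan (with identity fallback) equals B's reverse lookup
theorem pvScan_eq_getD (label : String) :
    (match pvScan label pvPriority with
     | some c => c
     | none => label) = PySem.Dict.getD pvCanonical label label := by
  have hrev : PySem.Dict.getD pvCanonical label label =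
      if label = "sleeve" then "sleeve" else if label = "coat" then "jacket"
      else if label = "shirt" then "top" else if label = "sweatshirt" then "top"
      else if label = "t-shirt" then "top" else label := by
    simp [pvCanonical, PySem.Dict.ofList, PySem.Dict.update,
      PySem.Dict.getD_insert, PySem.Dict.getD_empty]
  rw [hrev]
  simp only [pvScan, pvPriority, List.mem_cons, List.not_mem_nil]
  split_ifs <;> simp_all

theorem map_to_correct_label_spec : Claim_equal_map_to_correct_label := by
  intro labels _
  show map_to_correct_label labels = map_to_correct_label_alt labels
  unfold map_to_correct_label map_to_correct_label_alt
  rw [PySem.List.dedup_eq_ofList, PySem.Set.ofList_eq_foldl, List.foldl_map]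
  apply PySem.List.foldl_congr_mem
  intro s label _
  rw [← pvScan_eq_getD label]
  cases pvScan label pvPriority <;> rfl
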